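-- pv_equiv track=rewrite | github.com/raqmejtru/CS313E_Elements_of_Software_Design | BINARYSEARCH_tea/InterestingDrink.py | find_purchase_options
-- ===== SOURCE A (Python) =====
-- def binary_search(lst, x):
--     low = -1
--     high = len(lst)
--     while low < high - 1:
--         middle = (low + high) // 2
--         if lst[middle] <= x:
--             low = middle
--         else:
--             high = middle
--
--     # return index of x in lst
--     return low
--
-- def find_purchase_options(prices, money):
--     prices_sorted = sorted(prices)
--
--     lst_num_stores = []
--     for daily_max in money:
--         # Find index of daily_max in prices_sorted list
--         index = binary_search(prices_sorted, daily_max)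
--
--         # Find the length of the sublist of prices that are within daily max budget
--         prices_lt_or_eq_max = prices_sorted[0:index + 1]
--         lst_num_stores.append(len(prices_lt_or_eq_max))
--
--     return lst_num_stores
-- ===== SOURCE B (Python) =====
-- def find_purchase_options(prices, money):
--     return [sum(1 for p in prices if p <= m) for m in money]
-- ===== Notes on version B (the rewrite author's own statement) =====
-- stated objective: simpler
-- what changed: Replaces the sort + hand-written binary search + slice-and-measure per budget with a one-line direct count of prices <= budget for each budget.
import Mathlib
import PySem

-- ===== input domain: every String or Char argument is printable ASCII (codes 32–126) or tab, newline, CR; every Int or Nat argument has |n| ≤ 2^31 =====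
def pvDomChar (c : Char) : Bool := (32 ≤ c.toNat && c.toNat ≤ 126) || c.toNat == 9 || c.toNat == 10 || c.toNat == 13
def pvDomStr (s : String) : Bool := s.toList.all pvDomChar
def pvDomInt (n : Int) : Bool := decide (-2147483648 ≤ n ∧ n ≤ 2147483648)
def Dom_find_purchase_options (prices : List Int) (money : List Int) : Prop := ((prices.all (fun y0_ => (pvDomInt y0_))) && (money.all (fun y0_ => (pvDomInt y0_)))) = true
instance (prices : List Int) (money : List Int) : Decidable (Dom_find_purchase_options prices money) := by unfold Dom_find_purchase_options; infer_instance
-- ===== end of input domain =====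

-- B replaces A's sort + hand-written binary search + slice-and-measure with a direct
-- per-budget count of prices within budget: simpler, not faster.

-- ===== PORT A =====
-- the while loop of binary_search; low/high are the Python ints, lst[middle] via pyGet?
def bsLoop (lst : List Int) (x : Int) (low high : Int) : Int :=
  if _h : low < high - 1 then
    let middle := PySem.Int.floordiv (low + high) 2
    if (PySem.List.pyGet? lst middle).getD 0 ≤ x then
      bsLoop lst x middle high
    else
      bsLoop lst x low middle
  else low
termination_by (high - low).toNat
decreasing_by
  all_goals
    have hm := PySem.Int.floordiv_two_mid_bounds (lo := low + 1) (hi := high - 1) (by omega)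
    all_goals
      have he : low + 1 + (high - 1) = low + high := by ring
    all_goals rw [he] at hm
    all_goals omega

def binary_search (lst : List Int) (x : Int) : Int :=
  bsLoop lst x (-1) (lst.length : Int)

def find_purchase_options (prices : List Int) (money : List Int) : List Int :=
  let prices_sorted := PySem.List.sorted prices (fun p => p) false
  money.foldl (fun acc daily_max =>
    let index := binary_search prices_sorted daily_max
    let prices_lt_or_eq_max := PySem.List.slice prices_sorted (some 0) (some (index + 1))
    acc ++ [(prices_lt_or_eq_max.length : Int)]) []

-- ===== PORT B =====
def find_purchase_options_alt (prices : List Int) (money : List Int) : List Int :=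
  money.map (fun m => (prices.countP (fun p => decide (p ≤ m)) : Int))

-- ===== PRECONDITION & SPEC =====
def Spec_find_purchase_options (prices : List Int) (money : List Int) (out : List Int) : Prop := out = find_purchase_options_alt prices money
instance (prices : List Int) (money : List Int) (out : List Int) : Decidable (Spec_find_purchase_options prices money out) := by unfold Spec_find_purchase_options; infer_instance

-- ===== CLAIM (what is proved, stated in full; the proofs are below) =====
def Claim_equal_find_purchase_options : Prop := ∀ (prices : List Int) (money : List Int), Dom_find_purchase_options prices money → Spec_find_purchase_options prices money (find_purchase_options prices money)

-- ===== LEMMAS AND PROOFS =====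

-- If the first k positions of lst are ≤ x and all later positions are > x, countP is k.
lemma count_split (x : Int) : ∀ (lst : List Int) (k : Nat), k ≤ lst.length →
    (∀ (i : Nat) (h : i < lst.length), i < k → lst[i] ≤ x) →
    (∀ (i : Nat) (h : i < lst.length), k ≤ i → x < lst[i]) →
    lst.countP (fun p => decide (p ≤ x)) = k := by
  intro lst
  induction lst with
  | nil => intro k hk _ _; simp at hk ⊢; omega
  | cons a t ih =>
    intro k hk h1 h2
    cases k with
    | zero =>
      have ha : x < a := h2 0 (by simp) (by omega)
      have ht : t.countP (fun p => decide (p ≤ x)) = 0 :=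
        ih 0 (by omega) (fun i h hi => by omega)
          (fun i h _ => by
            have := h2 (i + 1) (by simp; omega) (by omega)
            simpa using this)
      simp [ht, not_le.mpr ha]
    | succ k' =>
      have ha : a ≤ x := h1 0 (by simp) (by omega)
      have ht : t.countP (fun p => decide (p ≤ x)) = k' :=
        ih k' (by simp at hk; omega)
          (fun i h hi => by
            have := h1 (i + 1) (by simp; omega) (by omega)
            simpa using this)
          (fun i h hi => by
            have := h2 (i + 1) (by simp; omega) (by omega)
            simpa using this)
      simp [ht, ha]

-- Loop invariant for A's binary search: on a (≤-index-monotone) list, the loop keeps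
-- "indices ≤ low are ≤ x, indices ≥ high are > x", so at exit low+1 is the count of ≤ x.
lemma bsLoop_count (lst : List Int) (x : Int)
    (hmono : ∀ (p q : Nat) (hpq : p ≤ q) (hq : q < lst.length),
      lst[p]'(Nat.lt_of_le_of_lt hpq hq) ≤ lst[q]) :
    ∀ (n : Nat) (low high : Int), (high - low).toNat ≤ n →
    -1 ≤ low → low < high → high ≤ (lst.length : Int) →
    (∀ (i : Nat) (hi : i < lst.length), (i : Int) ≤ low → lst[i] ≤ x) →
    (∀ (i : Nat) (hi : i < lst.length), high ≤ (i : Int) → x < lst[i]) →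
    bsLoop lst x low high + 1 = (lst.countP (fun p => decide (p ≤ x)) : Int) := by
  intro n
  induction n with
  | zero => intro low high hfuel _ hlh _ _ _; omega
  | succ n ih =>
    intro low high hfuel hlow hlh hhigh hL hH
    rw [bsLoop]
    by_cases hc : low < high - 1
    · simp only [hc, dif_pos]
      have hm := PySem.Int.floordiv_two_mid_bounds (lo := low + 1) (hi := high - 1) (by omega)
      have he : low + 1 + (high - 1) = low + high := by ring
      rw [he] at hm
      set middle := PySem.Int.floordiv (low + high) 2 with hmid
      have h0 : 0 ≤ middle := by omega
      have hlt : middle < (lst.length : Int) := by omega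
      have hltn : middle.toNat < lst.length := by omega
      have hget : PySem.List.pyGet? lst middle = some (lst[middle.toNat]) := by
        rw [PySem.List.pyGet?_of_nonneg (xs := lst) (i := middle) h0,
          List.getElem?_eq_getElem hltn]
      rw [hget]
      simp only [Option.getD_some]
      by_cases hx : lst[middle.toNat] ≤ x
      · simp only [hx, if_pos]
        exact ih middle high (by omega) (by omega) (by omega) hhigh
          (fun i hi hile => le_trans (hmono i middle.toNat (by omega) hltn) hx) hH
      · simp only [hx, if_neg, not_false_iff]
        exact ih low middle (by omega) hlow (by omega) (by omega) hL
          (fun i hi hge => lt_of_lt_of_le (lt_of_not_ge hx) (hmono middle.toNat i (by omega) hi))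
    · simp only [hc, dif_neg, not_false_iff]
      have hhe : high = low + 1 := by omega
      have hcnt : lst.countP (fun p => decide (p ≤ x)) = (low + 1).toNat := by
        apply count_split x lst (low + 1).toNat (by omega)
        · intro i hi hik; exact hL i hi (by omega)
        · intro i hi hik; exact hH i hi (by omega)
      rw [hcnt]; omega

-- A's per-budget value equals B's count.
lemma per_budget (prices : List Int) (m : Int) :
    ((PySem.List.slice (PySem.List.sorted prices (fun p => p) false) (some 0)
        (some (binary_search (PySem.List.sorted prices (fun p => p) false) m + 1))).length : Int)
      = (prices.countP (fun p => decide (p ≤ m)) : Int) := by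
  set s := PySem.List.sorted prices (fun p => p) false with hs
  have hperm : s.Perm prices := PySem.List.sorted_perm ..
  have hpw : s.Pairwise (fun a b => a ≤ b) := by
    simpa using PySem.List.sorted_pairwise (xs := prices) (key := fun p => p)
  have hmono : ∀ (p q : Nat) (hpq : p ≤ q) (hq : q < s.length),
      s[p]'(Nat.lt_of_le_of_lt hpq hq) ≤ s[q] := by
    intro p q hpq hq
    rcases Nat.lt_or_ge p q with h | h
    · exact (List.pairwise_iff_getElem.mp hpw) p q _ hq h
    · have : p = q := by omega
      subst this; exact le_refl _
  have hcount : binary_search s m + 1 = (s.countP (fun p => decide (p ≤ m)) : Int) := by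
    unfold binary_search
    exact bsLoop_count s m hmono ((s.length : Int) + 1).toNat (-1) (s.length : Int)
      (by omega) (by omega) (by omega) (le_refl _)
      (fun i hi hile => absurd hile (by omega))
      (fun i hi hge => absurd hge (by omega))
  rw [hcount]
  have hle : s.countP (fun p => decide (p ≤ m)) ≤ s.length := List.countP_le_length
  simp only [PySem.List.slice_zero_start, PySem.List.slice_to_natCast, List.length_take]
  have : s.countP (fun p => decide (p ≤ m)) = prices.countP (fun p => decide (p ≤ m)) :=
    hperm.countP_eq _
  omega

-- folding "append one result" is mapping.
lemma foldl_push (f : Int → Int) : ∀ (l : List Int) (acc : List Int),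
    l.foldl (fun a d => a ++ [f d]) acc = acc ++ l.map f := by
  intro l
  induction l with
  | nil => simp
  | cons d t ih => intro acc; simp [List.foldl_cons, ih, List.append_assoc]

-- ===== VERDICT (by name: the statement is the Claim_ definition above) =====
theorem find_purchase_options_spec : Claim_equal_find_purchase_options := by
  intro prices money _
  unfold Spec_find_purchase_options find_purchase_options find_purchase_options_alt
  simp only []
  rw [foldl_push (fun daily_max =>
    ((PySem.List.slice (PySem.List.sorted prices (fun p => p) false) (some 0)
      (some (binary_search (PySem.List.sorted prices (fun p => p) false) daily_max + 1))).length : Int))]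
  simp only [List.nil_append]
  exact List.map_congr_left (fun m _ => per_budget prices m)
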